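-- pv_equiv track=rewrite | github.com/ramieeee/phishing_mail_detection | feature_extraction.py | get_domain_url
-- ===== SOURCE A (Python) =====
-- def get_domain_url(url):
--     domain = ''
--     cnt = 0
--     for i in url:
--         if i == '/':
--             cnt += 1
--         if cnt == 3:
--             break
--         if cnt == 2:
--             domain += i
--     domain = domain[1:]
--     return domain
-- ===== SOURCE B (Python) =====
-- def get_domain_url(url):
--     parts = url.split('/')
--     return parts[2] if len(parts) > 2 else ''
-- ===== Notes on version B (the rewrite author's own statement) =====
-- stated objective: simpler
-- what changed: B tokenizes the URL once with split('/') and indexes segment 2 (guarded by the length), instead of A's character-by-character scan that counts slashes, accumulates characters while the count is 2, and strips the leading slash afterwards.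
import Mathlib
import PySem

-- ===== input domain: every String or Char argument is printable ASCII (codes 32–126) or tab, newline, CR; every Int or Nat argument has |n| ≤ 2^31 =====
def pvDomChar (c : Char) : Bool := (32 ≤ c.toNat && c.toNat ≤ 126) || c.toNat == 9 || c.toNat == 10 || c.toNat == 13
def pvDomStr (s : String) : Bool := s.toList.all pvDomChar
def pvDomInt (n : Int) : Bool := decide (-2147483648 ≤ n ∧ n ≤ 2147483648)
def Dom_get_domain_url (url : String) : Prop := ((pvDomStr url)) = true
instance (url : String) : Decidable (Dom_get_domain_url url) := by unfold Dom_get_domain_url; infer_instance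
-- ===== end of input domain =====

-- B replaces A's slash-counting character scan by one split('/') plus a guarded index (objective: simpler).

-- ===== PORT A =====
-- A's for-loop: state (domain, cnt); 'break' returns the accumulator
def getDomainLoop : List Char → List Char → Nat → List Char
  | [], domain, _ => domain
  | c :: rest, domain, cnt =>
    let cnt' := if c = '/' then cnt + 1 else cnt
    if cnt' = 3 then domain
    else if cnt' = 2 then getDomainLoop rest (domain ++ [c]) cnt'
    else getDomainLoop rest domain cnt'

def get_domain_url (url : String) : String :=
  -- domain = ''; cnt = 0; for i in url: ...; domain = domain[1:]
  String.ofList (PySem.Chars.slice (getDomainLoop url.toList [] 0) (some 1) none)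

-- ===== PORT B =====
def get_domain_url_alt (url : String) : String :=
  let parts := url.toList.splitOn '/'   -- url.split('/'), single-char separator
  if h : 2 < parts.length then String.ofList parts[2] else ""

-- ===== PRECONDITION & SPEC =====
def Spec_get_domain_url (url : String) (out : String) : Prop := out = get_domain_url_alt url
instance (url : String) (out : String) : Decidable (Spec_get_domain_url url out) := by unfold Spec_get_domain_url; infer_instance

-- ===== CLAIM (what is proved, stated in full; the proofs are below) =====
def Claim_equal_get_domain_url : Prop := ∀ (url : String), Dom_get_domain_url url → Spec_get_domain_url url (get_domain_url url)

-- ===== LEMMAS AND PROOFS =====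

-- cnt = 2 phase: collect until the next '/'
theorem loop2_eq (cs acc : List Char) :
    getDomainLoop cs acc 2 = acc ++ cs.takeWhile (· ≠ '/') := by
  induction cs generalizing acc with
  | nil => simp [getDomainLoop]
  | cons c rest ih =>
    by_cases h : c = '/'
    · simp [getDomainLoop, h]
    · rw [List.takeWhile_cons]
      simp only [getDomainLoop, if_neg h, decide_eq_true_eq]
      simp [h, ih, List.append_assoc]

-- splitOnP always starts with the slash-free prefix
theorem splitOnP_eq_cons (p : Char → Bool) (cs : List Char) :
    ∃ tl, List.splitOnP p cs = cs.takeWhile (fun c => ! p c) :: tl := by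
  induction cs with
  | nil => exact ⟨[], by simp [List.splitOnP_nil]⟩
  | cons c rest ih =>
    by_cases h : p c
    · exact ⟨List.splitOnP p rest, by simp [List.splitOnP_cons, h]⟩
    · obtain ⟨tl, htl⟩ := ih
      exact ⟨tl, by simp [List.splitOnP_cons, h, htl]⟩

-- the same, with the predicate and takeWhile in the loop's own form
theorem splitOnP_slash_eq_cons (cs : List Char) :
    ∃ tl, List.splitOnP (· == '/') cs = cs.takeWhile (· ≠ '/') :: tl := by
  induction cs with
  | nil => exact ⟨[], by simp [List.splitOnP_nil]⟩
  | cons c rest ih =>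
    by_cases h : c = '/'
    · exact ⟨List.splitOnP (· == '/') rest, by simp [List.splitOnP_cons, h]⟩
    · obtain ⟨tl, htl⟩ := ih
      exact ⟨tl, by simp [List.splitOnP_cons, h, htl]⟩

-- cnt = 1 phase vs index 1 of the split of the remainder
theorem loop1_eq (cs acc : List Char) :
    getDomainLoop cs acc 1 =
      acc ++ (if h : 1 < (List.splitOnP (· == '/') cs).length
        then '/' :: (List.splitOnP (· == '/') cs)[1] else []) := by
  induction cs generalizing acc with
  | nil => simp [getDomainLoop, List.splitOnP_nil]
  | cons c rest ih =>
    by_cases h : c = '/'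
    · subst h
      obtain ⟨tl, htl⟩ := splitOnP_slash_eq_cons rest
      simp only [getDomainLoop]
      norm_num [loop2_eq, List.splitOnP_cons, htl]
    · obtain ⟨tl, htl⟩ := splitOnP_eq_cons (· == '/') rest
      simp only [getDomainLoop, if_neg h]
      norm_num [ih, List.splitOnP_cons, h, htl]

-- cnt = 0 phase vs index 2 of the split
theorem loop0_eq (cs acc : List Char) :
    getDomainLoop cs acc 0 =
      acc ++ (if h : 2 < (List.splitOnP (· == '/') cs).length
        then '/' :: (List.splitOnP (· == '/') cs)[2] else []) := by
  induction cs generalizing acc with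
  | nil => simp [getDomainLoop, List.splitOnP_nil]
  | cons c rest ih =>
    by_cases h : c = '/'
    · simp only [getDomainLoop, if_pos h]
      norm_num [loop1_eq, List.splitOnP_cons, h]
      split_ifs with h1 h2 <;> first | rfl | omega
    · obtain ⟨tl, htl⟩ := splitOnP_eq_cons (· == '/') rest
      simp only [getDomainLoop, if_neg h]
      norm_num [ih, List.splitOnP_cons, h, htl]

-- ===== VERDICT (by name: the statement is the Claim_ definition above) =====
theorem get_domain_url_spec : Claim_equal_get_domain_url := by
  intro url _
  unfold Spec_get_domain_url get_domain_url get_domain_url_alt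
  rw [PySem.Chars.slice_eq_listSlice, PySem.List.slice_from_one, loop0_eq]
  dsimp only [List.splitOn]
  split_ifs with h
  · simp
  · simp
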